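-- pv_equiv track=rewrite | github.com/developer-hajun/-algorithm | 2개 이하로 다른 비트 (10,11) 시간초과.py | solution
-- ===== SOURCE A (Python) =====
-- def solution(numbers):
--     answer = []
--     for number in numbers:
--         bin1 = bin(number)[2:]
--         st = number+1
--         while True:
--             bin2 = bin(st)[2:]
--             max_len = max(len(bin1), len(bin2))
--             bin1= bin1.zfill(max_len)
--             bin2= bin2.zfill(max_len)
--             count = 0
--             for i in range(len(bin1)):
--                 if bin1[i]!=bin2[i]:
--                     count+=1
--                 if count>2:
--                     break
--             if count<=2:
--                 answer.append(st)
--                 break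
--             st+=1
--     return answer
-- ===== SOURCE B (Python) =====
-- def solution(numbers):
--     # Smallest value above each n whose binary rendering (bin shows the
--     # magnitude) differs from n's in at most two digit positions.  Going up
--     # from n changes the rendered magnitude -- n+1 for n >= 0, |n| counting
--     # down for n < 0 -- in its trailing-zero block: with t trailing zeros the
--     # first rendering within two digit changes is half that block away
--     # (at least one step).
--     answer = []
--     for n in numbers:
--         m = n + 1 if n >= 0 else -n
--         t = 0
--         while m % 2 == 0:
--             m //= 2
--             t += 1
--         answer.append(n + (1 << (t - 1) if t else 1))
--     return answer
-- ===== Notes on version B (the rewrite author's own statement) =====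
-- stated objective: alternative
-- what changed: Replaces A's linear search (trying st = n+1, n+2, ... and re-rendering both numbers as binary strings to count differing characters) by one closed-form step per element: n plus half the trailing-zero block of the changing magnitude (n+1 for n >= 0, |n| for n < 0), at least 1; Pre_ excludes lists containing -(2^k) for k >= 1, where A's bin('-...')[2:] keeps a stray 'b' that misaligns the shorter candidate strings and its value 0 is an accident of that.
-- outside the precondition, e.g. on solution([-4]): A returns [0], B returns [-2]; on solution([-2]): A returns [0], B returns [-1]; on solution([-16]): A returns [0], B returns [-8]
import Mathlib
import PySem

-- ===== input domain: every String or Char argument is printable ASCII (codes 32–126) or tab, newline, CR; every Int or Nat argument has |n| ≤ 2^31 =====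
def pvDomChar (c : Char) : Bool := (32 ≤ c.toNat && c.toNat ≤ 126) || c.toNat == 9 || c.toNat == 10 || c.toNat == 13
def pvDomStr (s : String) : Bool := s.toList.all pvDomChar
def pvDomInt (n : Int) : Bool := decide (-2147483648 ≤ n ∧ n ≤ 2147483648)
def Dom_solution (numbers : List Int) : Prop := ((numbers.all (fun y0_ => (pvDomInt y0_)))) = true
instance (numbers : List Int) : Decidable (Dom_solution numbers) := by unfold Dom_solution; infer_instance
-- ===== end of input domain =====

-- B replaces A's candidate-by-candidate search with string diff-counting by one closed-form
-- step per element: n plus half the trailing-zero block of the changing magnitude.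

-- ===== PORT A =====

-- binary digits of a positive Nat, most significant first (hand port of bin(n) digits; exact)
def natBin (n : Nat) : List Char :=
  if h : n = 0 then [] else natBin (n / 2) ++ [if n % 2 = 1 then '1' else '0']
decreasing_by exact Nat.div_lt_self (Nat.pos_of_ne_zero h) one_lt_two

-- bin(n)[2:] (hand port, exact: '0b…'[2:] for n ≥ 0 incl. '0' for 0; '-0b…'[2:] = 'b…' for n < 0)
def pyBinTail (n : Int) : List Char :=
  if n < 0 then 'b' :: natBin n.natAbs
  else if n = 0 then ['0'] else natBin n.toNat

-- the inner 'for i in range(len(bin1)) … if count>2: break' loop (zfill makes lengths equal)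
def countDiff : List Char → List Char → Nat → Nat
  | [], _, c => c
  | _ :: _, [], c => c
  | x :: xs, y :: ys, c =>
    let c' := if x ≠ y then c + 1 else c
    if c' > 2 then c' else countDiff xs ys c'

-- the 'while True' loop; fuel only makes it total (on the inputs admitted below it never runs out)
def findLoop : List Char → Int → Nat → Int
  | _,    st, 0 => st
  | bin1, st, fuel + 1 =>
    let bin2 := pyBinTail st
    let maxLen : Int := max (PySem.List.len bin1) (PySem.List.len bin2)
    let b1 := PySem.Chars.zfill bin1 maxLen
    let b2 := PySem.Chars.zfill bin2 maxLen
    if countDiff b1 b2 0 ≤ 2 then st else findLoop b1 (st + 1) fuel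

def solution (numbers : List Int) : List Int :=
  numbers.foldl (fun answer number => answer ++ [findLoop (pyBinTail number) (number + 1) (2 ^ 40)]) []

-- ===== PORT B =====

-- the 'while m % 2 == 0' trailing-zeros count; fuel only makes it total
def trailZerosI : Int → Nat → Nat
  | _, 0 => 0
  | m, fuel + 1 => if PySem.Int.mod m 2 = 0 then trailZerosI (PySem.Int.floordiv m 2) fuel + 1 else 0

def solution_alt (numbers : List Int) : List Int :=
  numbers.foldl (fun answer number =>
    answer ++ [let m := if 0 ≤ number then number + 1 else -number
               let t := trailZerosI m 64
               number + (if t ≠ 0 then 2 ^ (t - 1) else 1)]) []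

-- ===== PRECONDITION & SPEC =====

-- Pre_ excludes lists containing -(2^k) for k ≥ 1: there the candidates' bin() digit strings
-- are shorter than |n|'s, the 'b' kept from slicing '-0b…' misaligns, and A's value (always 0)
-- is an accident of that string comparison (-1, where both programs return 0, stays included).
def Pre_solution (numbers : List Int) : Prop :=
  ∀ n ∈ numbers, n < 0 → ∀ k : Nat, 1 ≤ k → k ≤ 64 → -n ≠ 2 ^ k
instance (numbers : List Int) : Decidable (Pre_solution numbers) := by unfold Pre_solution; infer_instance

def pvWitness_solution : List Int := [0, 1, 3, 4, 7, -1, -3, -12, -40]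

def Spec_solution (numbers : List Int) (out : List Int) : Prop := out = solution_alt numbers
instance (numbers : List Int) (out : List Int) : Decidable (Spec_solution numbers out) := by unfold Spec_solution; infer_instance

-- ===== CLAIM (what is proved, stated in full; the proofs are below) =====
def Claim_equal_solution : Prop := ∀ (numbers : List Int), Dom_solution numbers → Pre_solution numbers → Spec_solution numbers (solution numbers)

-- ===== LEMMAS AND PROOFS =====

-- fixed-width binary rendering, MSB first
def bitsF : Nat → Nat → List Char
  | 0, _ => []
  | m + 1, a => bitsF m (a / 2) ++ [if a % 2 = 1 then '1' else '0']

-- plain count of differing positions (no break)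
def dC : List Char → List Char → Nat
  | x :: xs, y :: ys => (if x ≠ y then 1 else 0) + dC xs ys
  | _, _ => 0

-- Hamming distance of two Nats
def hd (a b : Nat) : Nat :=
  if a = 0 ∧ b = 0 then 0 else (if a % 2 = b % 2 then 0 else 1) + hd (a / 2) (b / 2)
termination_by a + b
decreasing_by
  have ha := Nat.div_le_self a 2; have hb := Nat.div_le_self b 2
  rcases Decidable.not_and_iff_or_not.mp (by assumption) with h | h
  · exact Nat.add_lt_add_of_lt_of_le (Nat.div_lt_self (Nat.pos_of_ne_zero h) one_lt_two) hb
  · exact Nat.add_lt_add_of_le_of_lt ha (Nat.div_lt_self (Nat.pos_of_ne_zero h) one_lt_two)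

-- xor as a Nat (same recursion, value 2*… + bit)
def xr (a b : Nat) : Nat :=
  if a = 0 ∧ b = 0 then 0 else (if a % 2 = b % 2 then 0 else 1) + 2 * xr (a / 2) (b / 2)
termination_by a + b
decreasing_by
  have ha := Nat.div_le_self a 2; have hb := Nat.div_le_self b 2
  rcases Decidable.not_and_iff_or_not.mp (by assumption) with h | h
  · exact Nat.add_lt_add_of_lt_of_le (Nat.div_lt_self (Nat.pos_of_ne_zero h) one_lt_two) hb
  · exact Nat.add_lt_add_of_le_of_lt ha (Nat.div_lt_self (Nat.pos_of_ne_zero h) one_lt_two)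

-- popcount
def pc (n : Nat) : Nat :=
  if h : n = 0 then 0 else n % 2 + pc (n / 2)
decreasing_by exact Nat.div_lt_self (Nat.pos_of_ne_zero h) one_lt_two

-- Nat-level trailing-ones count
def trailN (a : Nat) : Nat :=
  if h : a % 2 = 1 then trailN (a / 2) + 1 else 0
decreasing_by exact Nat.div_lt_self (by omega) one_lt_two

-- scratch: basic lemmas
theorem hd_step (a b : Nat) : hd a b = (if a % 2 = b % 2 then 0 else 1) + hd (a / 2) (b / 2) := by
  rw [hd]
  by_cases h : a = 0 ∧ b = 0
  · obtain ⟨ha, hb⟩ := h; subst ha; subst hb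
    simp [hd]
  · simp [h]

theorem xr_step (a b : Nat) (h : ¬ (a = 0 ∧ b = 0)) :
    xr a b = (if a % 2 = b % 2 then 0 else 1) + 2 * xr (a / 2) (b / 2) := by
  rw [xr]; simp [h]

theorem hd_self (a : Nat) : hd a a = 0 := by
  induction a using Nat.strong_induction_on with
  | _ a ih =>
    by_cases h : a = 0
    · subst h; rw [hd]; simp
    · rw [hd_step]; simp [ih (a / 2) (Nat.div_lt_self (Nat.pos_of_ne_zero h) one_lt_two)]

theorem xr_self (a : Nat) : xr a a = 0 := by
  induction a using Nat.strong_induction_on with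
  | _ a ih =>
    by_cases h : a = 0
    · subst h; rw [xr]; simp
    · rw [xr_step _ _ (by simp [h])]
      simp [ih (a / 2) (Nat.div_lt_self (Nat.pos_of_ne_zero h) one_lt_two)]

theorem pc_step (n : Nat) (h : n ≠ 0) : pc n = n % 2 + pc (n / 2) := by
  rw [pc]; simp [h]

theorem pc_two_mul (x : Nat) : pc (2 * x) = pc x := by
  by_cases h : x = 0
  · subst h; simp
  · rw [pc_step _ (by omega)]
    simp [Nat.mul_mod_right]

theorem pc_two_mul_add_one (x : Nat) : pc (2 * x + 1) = 1 + pc x := by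
  rw [pc_step _ (by omega)]
  have h1 : (2 * x + 1) % 2 = 1 := by omega
  have h2 : (2 * x + 1) / 2 = x := by omega
  rw [h1, h2]

theorem hd_eq_pc_xr_aux : ∀ (s a b : Nat), a + b ≤ s → hd a b = pc (xr a b) := by
  intro s
  induction s with
  | zero => intro a b h
            have : a = 0 ∧ b = 0 := by omega
            obtain ⟨ha, hb⟩ := this; subst ha; subst hb; rw [hd, xr]; simp [pc]
  | succ s ih =>
    intro a b hs
    by_cases h : a = 0 ∧ b = 0
    · obtain ⟨ha, hb⟩ := h; subst ha; subst hb; rw [hd, xr]; simp [pc]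
    · rw [hd_step, xr_step _ _ h]
      have hlt : a / 2 + b / 2 ≤ s := by
        have ha := Nat.div_le_self a 2; have hb := Nat.div_le_self b 2
        rcases Decidable.not_and_iff_or_not.mp h with hne | hne
        · have := Nat.div_lt_self (Nat.pos_of_ne_zero hne) one_lt_two; omega
        · have := Nat.div_lt_self (Nat.pos_of_ne_zero hne) one_lt_two; omega
      rw [ih _ _ hlt]
      by_cases hp : a % 2 = b % 2
      · simp [hp, pc_two_mul]
      · simp only [hp, if_false]
        rw [show 1 + 2 * xr (a / 2) (b / 2) = 2 * xr (a / 2) (b / 2) + 1 from by omega,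
            pc_two_mul_add_one]

theorem hd_eq_pc_xr (a b : Nat) : hd a b = pc (xr a b) :=
  hd_eq_pc_xr_aux (a + b) a b le_rfl

theorem pc_pow (k : Nat) : pc (2 ^ k) = 1 := by
  induction k with
  | zero => simp [pc]
  | succ k ih =>
    rw [pc_step _ (by positivity)]
    have h1 : 2 ^ (k + 1) % 2 = 0 := by simp [Nat.pow_succ, Nat.mul_mod_left]
    have h2 : 2 ^ (k + 1) / 2 = 2 ^ k := by rw [Nat.pow_succ]; omega
    rw [h1, h2, ih]

theorem pc_pos (n : Nat) (h : 0 < n) : 1 ≤ pc n := by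
  induction n using Nat.strong_induction_on with
  | _ n ih =>
    rw [pc_step _ (by omega)]
    by_cases hp : n % 2 = 1
    · omega
    · have h1 : n % 2 = 0 := by omega
      have h2 : 0 < n / 2 := by omega
      have := ih (n / 2) (Nat.div_lt_self h one_lt_two) h2
      omega

theorem pc_topbit (k e : Nat) (he : e < 2 ^ k) : pc (2 ^ k + e) = 1 + pc e := by
  induction k generalizing e with
  | zero => interval_cases e; simp [pc]
  | succ k ih =>
    by_cases he0 : e = 0
    · subst he0
      rw [show 2 ^ (k+1) + 0 = 2 ^ (k+1) from by omega, pc_pow]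
      simp [pc]
    · rw [pc_step _ (by positivity)]
      have hm : (2 ^ (k + 1) + e) % 2 = e % 2 := by
        rw [Nat.add_mod, Nat.pow_succ, Nat.mul_mod_left]; simp [Nat.mod_mod_of_dvd]
      have hd2 : (2 ^ (k + 1) + e) / 2 = 2 ^ k + e / 2 := by
        rw [Nat.pow_succ]; omega
      rw [hm, hd2, ih (e / 2) (by rw [Nat.pow_succ] at he; omega), pc_step e he0]
      omega

theorem pc_eq_one (n j : Nat) (h1 : 2 ^ j ≤ n) (h2 : n < 2 ^ (j + 1)) (hpc : pc n = 1) :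
    n = 2 ^ j := by
  induction j generalizing n with
  | zero => omega
  | succ j ih =>
    have hn0 : n ≠ 0 := by
      have : (0:Nat) < 2 ^ (j+1) := by positivity
      omega
    rw [pc_step _ hn0] at hpc
    have hdiv1 : 2 ^ j ≤ n / 2 := by
      rw [Nat.pow_succ] at h1; omega
    have hdiv2 : n / 2 < 2 ^ (j + 1) := by
      rw [Nat.pow_succ] at h2; omega
    by_cases hp : n % 2 = 1
    · exfalso
      have hj : (0:Nat) < 2 ^ j := by positivity
      have := pc_pos (n / 2) (by omega)
      omega
    · have := ih (n / 2) hdiv1 hdiv2 (by omega)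
      rw [Nat.pow_succ]
      omega

theorem xr_high (m q r s : Nat) (hr : r < 2 ^ m) (hs : s < 2 ^ m) :
    xr (q * 2 ^ m + r) (q * 2 ^ m + s) = xr r s := by
  induction m generalizing q r s with
  | zero =>
    interval_cases r; interval_cases s; simp [xr_self]
  | succ m ih =>
    by_cases hrs : r = s
    · subst hrs; rw [xr_self, xr_self]
    · have hne : ¬ (q * 2 ^ (m + 1) + r = 0 ∧ q * 2 ^ (m + 1) + s = 0) := by omega
      have hne2 : ¬ (r = 0 ∧ s = 0) := by omega
      rw [xr_step _ _ hne, xr_step _ _ hne2]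
      have e1 : (q * 2 ^ (m + 1) + r) % 2 = r % 2 := by
        rw [Nat.add_mod, Nat.pow_succ]
        conv_lhs => rw [show q * (2 ^ m * 2) = (q * 2 ^ m) * 2 from by ring]
        rw [Nat.mul_mod_left]; simp [Nat.mod_mod_of_dvd]
      have e2 : (q * 2 ^ (m + 1) + s) % 2 = s % 2 := by
        rw [Nat.add_mod, Nat.pow_succ]
        conv_lhs => rw [show q * (2 ^ m * 2) = (q * 2 ^ m) * 2 from by ring]
        rw [Nat.mul_mod_left]; simp [Nat.mod_mod_of_dvd]
      have e3 : (q * 2 ^ (m + 1) + r) / 2 = q * 2 ^ m + r / 2 := by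
        rw [Nat.pow_succ]
        rw [show q * (2 ^ m * 2) + r = (q * 2 ^ m) * 2 + r from by ring_nf]
        omega
      have e4 : (q * 2 ^ (m + 1) + s) / 2 = q * 2 ^ m + s / 2 := by
        rw [Nat.pow_succ]
        rw [show q * (2 ^ m * 2) + s = (q * 2 ^ m) * 2 + s from by ring_nf]
        omega
      rw [e1, e2, e3, e4, ih q (r / 2) (s / 2) (by omega) (by omega)]

theorem xr_mask (k e : Nat) (he : e < 2 ^ k) : xr (2 ^ k - 1) e = 2 ^ k - 1 - e := by
  induction k generalizing e with
  | zero => interval_cases e; simp [xr_self]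
  | succ k ih =>
    have hpow : (2:Nat) ^ (k + 1) = 2 ^ k * 2 := by rw [Nat.pow_succ]
    have hne : ¬ (2 ^ (k + 1) - 1 = 0 ∧ e = 0) := by
      have : (1:Nat) ≤ 2 ^ k := Nat.one_le_two_pow
      omega
    rw [xr_step _ _ hne]
    have hp1 : (2 ^ (k + 1) - 1) % 2 = 1 := by omega
    have hp2 : (2 ^ (k + 1) - 1) / 2 = 2 ^ k - 1 := by omega
    rw [hp1, hp2, ih (e / 2) (by omega)]
    have h2k : (1:Nat) ≤ 2 ^ k := Nat.one_le_two_pow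
    by_cases hp : e % 2 = 1
    · simp [hp]; omega
    · have : e % 2 = 0 := by omega
      simp [this]; omega

theorem xr_topbit (k r e : Nat) (hr : r < 2 ^ k) (he : e < 2 ^ k) :
    xr r (2 ^ k + e) = 2 ^ k + xr r e := by
  induction k generalizing r e with
  | zero =>
    interval_cases r; interval_cases e
    rw [xr_step _ _ (by omega)]
    norm_num [xr_self, xr]
  | succ k ih =>
    have hpow : (2:Nat) ^ (k + 1) = 2 ^ k * 2 := by rw [Nat.pow_succ]
    have hne : ¬ (r = 0 ∧ 2 ^ (k + 1) + e = 0) := by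
      have : (0:Nat) < 2 ^ (k+1) := by positivity
      omega
    rw [xr_step _ _ hne]
    have e1 : (2 ^ (k + 1) + e) % 2 = e % 2 := by omega
    have e2 : (2 ^ (k + 1) + e) / 2 = 2 ^ k + e / 2 := by omega
    rw [e1, e2, ih (r / 2) (e / 2) (by omega) (by omega)]
    by_cases h0 : r = 0 ∧ e = 0
    · obtain ⟨h0r, h0e⟩ := h0; subst h0r; subst h0e
      simp [xr_self, Nat.pow_succ, Nat.mul_comm]
    · rw [xr_step r e h0]
      omega

theorem hd_odd (k q d : Nat) (hk : 1 ≤ k) (hd1 : 1 ≤ d) (hd2 : d ≤ 2 ^ (k - 1)) :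
    hd (q * 2 ^ (k + 1) + (2 ^ k - 1)) (q * 2 ^ (k + 1) + (2 ^ k - 1) + d) = 1 + pc (2 ^ k - d) := by
  have hhalf : 2 ^ (k - 1) * 2 = 2 ^ k := by
    rw [← Nat.pow_succ]; congr 1; omega
  have h1 : (1:Nat) ≤ 2 ^ (k - 1) := Nat.one_le_two_pow
  have hklt : (2:Nat) ^ k < 2 ^ (k + 1) := by rw [Nat.pow_succ]; omega
  have e : q * 2 ^ (k + 1) + (2 ^ k - 1) + d = q * 2 ^ (k + 1) + (2 ^ k + (d - 1)) := by omega
  rw [e, hd_eq_pc_xr]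
  rw [xr_high (k + 1) q (2 ^ k - 1) (2 ^ k + (d - 1)) (by omega) (by rw [Nat.pow_succ]; omega)]
  rw [xr_topbit k (2 ^ k - 1) (d - 1) (by omega) (by omega)]
  rw [xr_mask k (d - 1) (by omega)]
  rw [show 2 ^ k + (2 ^ k - 1 - (d - 1)) = 2 ^ k + (2 ^ k - d) from by omega]
  rw [pc_topbit k (2 ^ k - d) (by omega)]

theorem hd_even (a : Nat) (h : a % 2 = 0) : hd a (a + 1) = 1 := by
  rw [hd_step]
  have h1 : (a + 1) % 2 = 1 := by omega
  have h2 : (a + 1) / 2 = a / 2 := by omega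
  rw [h1, h2, hd_self]
  simp [h]

-- trailN: representation of an odd number
theorem trailN_step (a : Nat) (h : a % 2 = 1) : trailN a = trailN (a / 2) + 1 := by
  rw [trailN]; simp [h]

theorem trailN_even (a : Nat) (h : a % 2 = 0) : trailN a = 0 := by
  rw [trailN]
  have : ¬ (a % 2 = 1) := by omega
  simp [this]

theorem trailN_mod (a : Nat) (h : a % 2 = 1) :
    a % 2 ^ (trailN a + 1) = 2 ^ (trailN a) - 1 := by
  induction a using Nat.strong_induction_on with
  | _ a ih =>
    have ha0 : a ≠ 0 := by omega
    rw [trailN_step a h]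
    set b := a / 2 with hb
    have hab : a = 2 * b + 1 := by omega
    by_cases hb2 : b % 2 = 1
    · have ihb := ih b (by omega) hb2
      set k := trailN b with hk
      have hpow : (2:Nat) ^ (k + 1 + 1) = 2 ^ (k + 1) * 2 := by rw [Nat.pow_succ]
      have h1k : (1:Nat) ≤ 2 ^ k := Nat.one_le_two_pow
      have hbmod := Nat.mod_lt b (y := 2 ^ (k + 1)) (by positivity)
      have key : a % (2 ^ (k + 1) * 2) = 2 * (b % 2 ^ (k + 1)) + 1 := by
        rw [hab]
        rw [Nat.mul_comm (2 ^ (k + 1)) 2]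
        rw [Nat.add_mod, Nat.mul_mod_mul_left]
        have : (1:Nat) % (2 * 2 ^ (k + 1)) = 1 := Nat.mod_eq_of_lt (by omega)
        rw [this, Nat.mod_eq_of_lt (by omega)]
      rw [hpow, key, ihb]
      rw [Nat.pow_succ]
      omega
    · have hb0 : b % 2 = 0 := by omega
      have ht : trailN b = 0 := by rw [trailN]; simp [hb2]
      rw [ht]
      have : a % 4 = 1 := by omega
      simpa using this

theorem trailN_ge_one (a : Nat) (h : a % 2 = 1) : 1 ≤ trailN a := by
  rw [trailN_step a h]; omega

theorem two_pow_trailN_le (a : Nat) (h : a % 2 = 1) : 2 ^ (trailN a) ≤ a + 1 := by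
  have := trailN_mod a h
  have h2 := Nat.mod_le a (2 ^ (trailN a + 1))
  have h1 : (1:Nat) ≤ 2 ^ (trailN a) := Nat.one_le_two_pow
  omega

theorem trailN_rep (a : Nat) (h : a % 2 = 1) :
    a = a / 2 ^ (trailN a + 1) * 2 ^ (trailN a + 1) + (2 ^ (trailN a) - 1) := by
  have h1 := trailN_mod a h
  calc a = 2 ^ (trailN a + 1) * (a / 2 ^ (trailN a + 1)) + a % 2 ^ (trailN a + 1) :=
        (Nat.div_add_mod a _).symm
    _ = a / 2 ^ (trailN a + 1) * 2 ^ (trailN a + 1) + (2 ^ (trailN a) - 1) := by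
        rw [h1, Nat.mul_comm]

-- ===== string side =====

theorem length_bitsF (m a : Nat) : (bitsF m a).length = m := by
  induction m generalizing a with
  | zero => rfl
  | succ m ih => simp [bitsF, ih]

theorem mem_bitsF (m a : Nat) : ∀ c ∈ bitsF m a, c = '0' ∨ c = '1' := by
  induction m generalizing a with
  | zero => simp [bitsF]
  | succ m ih =>
    intro c hc
    simp only [bitsF, List.mem_append, List.mem_singleton] at hc
    rcases hc with hc | hc
    · exact ih (a / 2) c hc
    · subst hc; split <;> simp

theorem bitsF_succ_of_lt (m a : Nat) (h : a < 2 ^ m) : bitsF (m + 1) a = '0' :: bitsF m a := by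
  induction m generalizing a with
  | zero =>
    interval_cases a; rfl
  | succ m ih =>
    have : a / 2 < 2 ^ m := by rw [Nat.pow_succ] at h; omega
    calc bitsF (m + 2) a = bitsF (m + 1) (a / 2) ++ [if a % 2 = 1 then '1' else '0'] := rfl
      _ = ('0' :: bitsF m (a / 2)) ++ [if a % 2 = 1 then '1' else '0'] := by rw [ih _ this]
      _ = '0' :: bitsF (m + 1) a := rfl

theorem bitsF_add_of_lt (j m a : Nat) (h : a < 2 ^ m) :
    bitsF (m + j) a = List.replicate j '0' ++ bitsF m a := by
  induction j with
  | zero => simp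
  | succ j ih =>
    have h2 : a < 2 ^ (m + j) := lt_of_lt_of_le h (Nat.pow_le_pow_right (by omega) (by omega))
    calc bitsF (m + (j + 1)) a = bitsF ((m + j) + 1) a := by ring_nf
      _ = '0' :: bitsF (m + j) a := bitsF_succ_of_lt _ _ h2
      _ = '0' :: (List.replicate j '0' ++ bitsF m a) := by rw [ih]
      _ = List.replicate (j + 1) '0' ++ bitsF m a := by simp [List.replicate_succ]

-- natBin / pbin vs bitsF
theorem natBin_eq_bitsF (n : Nat) (h : n ≠ 0) :
    natBin n = bitsF (natBin n).length n ∧ n < 2 ^ (natBin n).length := by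
  induction n using Nat.strong_induction_on with
  | _ n ih =>
    rw [natBin]
    simp only [h, dite_false]
    by_cases h2 : n / 2 = 0
    · have : n = 1 := by omega
      subst this
      constructor
      · rw [natBin]; norm_num [bitsF]
      · rw [natBin]; norm_num
    · obtain ⟨ih1, ih2⟩ := ih (n / 2) (Nat.div_lt_self (by omega) one_lt_two) h2
      constructor
      · simp only [List.length_append, List.length_singleton]
        rw [show bitsF ((natBin (n / 2)).length + 1) n
              = bitsF (natBin (n / 2)).length (n / 2) ++ [if n % 2 = 1 then '1' else '0'] from rfl]
        rw [← ih1]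
      · simp only [List.length_append, List.length_singleton]
        rw [Nat.pow_succ]
        omega

def pbinLen (n : Nat) : Nat := (pyBinTail (n : Int)).length

theorem pyBinTail_natCast (n : Nat) :
    pyBinTail (n : Int) = bitsF (pbinLen n) n ∧ n < 2 ^ (pbinLen n) ∧ 0 < pbinLen n := by
  unfold pbinLen pyBinTail
  by_cases h : n = 0
  · subst h; norm_num [bitsF]
  · have hneg : ¬ ((n : Int) < 0) := by omega
    have hne : ¬ ((n : Int) = 0) := by exact_mod_cast h
    simp only [hneg, if_false, hne, Int.toNat_natCast]
    obtain ⟨h1, h2⟩ := natBin_eq_bitsF n h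
    refine ⟨h1, h2, ?_⟩
    by_contra hl
    have : (natBin n).length = 0 := by omega
    rw [this] at h2
    simp at h2
    omega

theorem zfill_bitsF (L w a : Nat) (ha : a < 2 ^ L) (hL : 0 < L) (hw : L ≤ w) :
    PySem.Chars.zfill (bitsF L a) (w : Int) = bitsF w a := by
  unfold PySem.Chars.zfill
  by_cases hle : (w : Int) ≤ PySem.List.len (bitsF L a)
  · have : w = L := by
      simp only [PySem.List.len, length_bitsF] at hle
      omega
    subst this
    simp [PySem.List.len, length_bitsF]
  · simp only [PySem.List.len, length_bitsF] at hle
    have hwL : L < w := by omega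
    simp only [PySem.List.len, length_bitsF, hle, if_false]
    obtain ⟨c, rest, hcr⟩ : ∃ c rest, bitsF L a = c :: rest := by
      cases hbf : bitsF L a with
      | nil => exfalso; have := length_bitsF L a; rw [hbf] at this; simp at this; omega
      | cons c rest => exact ⟨c, rest, rfl⟩
    rw [hcr]
    have hc01 : c = '0' ∨ c = '1' := mem_bitsF L a c (by rw [hcr]; simp)
    have hcpm : ¬ (c = '+' ∨ c = '-') := by rcases hc01 with h | h <;> subst h <;> decide
    simp only [hcpm, if_false]
    have hlen : (c :: rest).length = L := by rw [← hcr]; exact length_bitsF L a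
    have hbw : bitsF w a = List.replicate (w - L) '0' ++ (c :: rest) := by
      conv_lhs => rw [show w = L + (w - L) from by omega]
      rw [bitsF_add_of_lt (w - L) L a ha, hcr]
    exact hbw.symm

theorem dC_append (l1 l2 : List Char) (x y : Char) (h : l1.length = l2.length) :
    dC (l1 ++ [x]) (l2 ++ [y]) = dC l1 l2 + (if x ≠ y then 1 else 0) := by
  induction l1 generalizing l2 with
  | nil =>
    cases l2 with
    | nil => simp [dC]
    | cons b bs => simp at h
  | cons a as ih =>
    cases l2 with
    | nil => simp at h
    | cons b bs =>
      simp only [List.cons_append, dC]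
      rw [ih bs (by simpa using h)]
      omega

theorem dC_bitsF (m a b : Nat) (ha : a < 2 ^ m) (hb : b < 2 ^ m) :
    dC (bitsF m a) (bitsF m b) = hd a b := by
  induction m generalizing a b with
  | zero =>
    interval_cases a; interval_cases b
    simp [bitsF, dC, hd_self]
  | succ m ih =>
    simp only [bitsF]
    rw [dC_append _ _ _ _ (by rw [length_bitsF, length_bitsF])]
    rw [ih (a / 2) (b / 2) (by rw [Nat.pow_succ] at ha; omega) (by rw [Nat.pow_succ] at hb; omega)]
    rw [hd_step a b]
    by_cases hp : a % 2 = b % 2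
    · simp [hp]
    · have ha2 := Nat.mod_two_eq_zero_or_one a
      have hb2 := Nat.mod_two_eq_zero_or_one b
      rcases ha2 with h1 | h1 <;> rcases hb2 with h2 | h2 <;> simp [h1, h2] at hp ⊢
      all_goals omega

theorem countDiff_le_iff (l1 l2 : List Char) (c : Nat) :
    countDiff l1 l2 c ≤ 2 ↔ c + dC l1 l2 ≤ 2 := by
  induction l1 generalizing l2 c with
  | nil => simp [countDiff, dC]
  | cons x xs ih =>
    cases l2 with
    | nil => simp [countDiff, dC]
    | cons y ys =>
      simp only [countDiff, dC]
      by_cases hxy : x = y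
      · simp only [hxy, ne_eq, not_true_eq_false, if_false]
        have : ¬ (c > 2) ∨ (c > 2) := by omega
        by_cases hc : c > 2
        · simp [hc]; omega
        · simp [hc, ih]
      · have hne : x ≠ y := hxy
        simp only [hne, ne_eq, not_false_eq_true, if_true]
        by_cases hc : c + 1 > 2
        · simp [hc]; omega
        · simp [hc, ih]
          omega

theorem loop_main (a : Nat) :
    ∀ (fuel L st T : Nat), 0 < L → a < 2 ^ L → 0 < st → st ≤ T → T - st < fuel →
    (∀ u : Nat, st ≤ u → u < T → 2 < hd a u) → hd a T ≤ 2 →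
    findLoop (bitsF L a) (st : Int) fuel = (T : Int) := by
  intro fuel
  induction fuel with
  | zero => intro L st T _ _ _ _ h; omega
  | succ fuel ih =>
    intro L st T hL ha hst0 hstT hfuel hbelow hT
    obtain ⟨h1, h2, h3⟩ := pyBinTail_natCast st
    set L2 := pbinLen st with hL2
    rw [findLoop]
    simp only [h1]
    have hmax : max (PySem.List.len (bitsF L a)) (PySem.List.len (bitsF L2 st))
        = ((max L L2 : Nat) : Int) := by
      simp [PySem.List.len, length_bitsF]
    rw [hmax]
    set w := max L L2 with hw
    have haw : a < 2 ^ w := lt_of_lt_of_le ha (Nat.pow_le_pow_right (by omega) (by omega))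
    have hsw : st < 2 ^ w := lt_of_lt_of_le h2 (Nat.pow_le_pow_right (by omega) (by omega))
    rw [zfill_bitsF L w a ha hL (by omega), zfill_bitsF L2 w st h2 h3 (by omega)]
    have hcond : (countDiff (bitsF w a) (bitsF w st) 0 ≤ 2) ↔ hd a st ≤ 2 := by
      rw [countDiff_le_iff, dC_bitsF w a st haw hsw]
      omega
    by_cases hc : countDiff (bitsF w a) (bitsF w st) 0 ≤ 2
    · have hdst : hd a st ≤ 2 := hcond.mp hc
      have : ¬ (st < T) := fun hlt => absurd hdst (by have := hbelow st le_rfl hlt; omega)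
      have hTst : st = T := by omega
      subst hTst
      rw [if_pos hc]
    · have hdst : ¬ (hd a st ≤ 2) := fun h => hc (hcond.mpr h)
      have hne : st ≠ T := fun h => hdst (h ▸ hT)
      have hlt : st < T := by omega
      simp only [hc, if_false]
      have : ((st : Int) + 1) = ((st + 1 : Nat) : Int) := by push_cast; ring
      rw [this]
      exact ih w (st + 1) T (by omega) haw (by omega) (by omega) (by omega)
        (fun u hu1 hu2 => hbelow u (by omega) hu2) hT

-- ===== trailing zeros of a Nat =====

def trailZ (v : Nat) : Nat :=
  if h : v % 2 = 0 ∧ v ≠ 0 then trailZ (v / 2) + 1 else 0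
decreasing_by exact Nat.div_lt_self (Nat.pos_of_ne_zero h.2) one_lt_two

theorem trailZ_step (v : Nat) (h : v % 2 = 0) (h0 : v ≠ 0) : trailZ v = trailZ (v / 2) + 1 := by
  rw [trailZ]; simp [h, h0]

theorem trailZ_odd (v : Nat) (h : v % 2 = 1) : trailZ v = 0 := by
  rw [trailZ]
  have : ¬ (v % 2 = 0 ∧ v ≠ 0) := by omega
  simp [this]

theorem trailZ_mod (v : Nat) (h0 : v ≠ 0) : v % 2 ^ (trailZ v + 1) = 2 ^ (trailZ v) := by
  induction v using Nat.strong_induction_on with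
  | _ v ih =>
    by_cases hp : v % 2 = 0
    · have hb : v / 2 ≠ 0 := by omega
      have ihb := ih (v / 2) (Nat.div_lt_self (by omega) one_lt_two) hb
      rw [trailZ_step v hp h0]
      set t := trailZ (v / 2) with ht
      have hv2 : v = 2 * (v / 2) := by omega
      calc v % 2 ^ (t + 1 + 1) = (2 * (v / 2)) % (2 * 2 ^ (t + 1)) := by
            rw [← hv2]; congr 1; ring
        _ = 2 * ((v / 2) % 2 ^ (t + 1)) := Nat.mul_mod_mul_left 2 _ _
        _ = 2 ^ (t + 1) := by rw [ihb]; ring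
    · have hp1 : v % 2 = 1 := by omega
      rw [trailZ_odd v hp1]
      simpa using hp1

theorem trailZ_rep (v : Nat) (h0 : v ≠ 0) :
    v = v / 2 ^ (trailZ v + 1) * 2 ^ (trailZ v + 1) + 2 ^ (trailZ v) := by
  have h1 := trailZ_mod v h0
  calc v = 2 ^ (trailZ v + 1) * (v / 2 ^ (trailZ v + 1)) + v % 2 ^ (trailZ v + 1) :=
        (Nat.div_add_mod v _).symm
    _ = v / 2 ^ (trailZ v + 1) * 2 ^ (trailZ v + 1) + 2 ^ (trailZ v) := by
        rw [h1, Nat.mul_comm]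

theorem two_pow_trailZ_le (v : Nat) (h0 : v ≠ 0) : 2 ^ (trailZ v) ≤ v := by
  have h1 := trailZ_mod v h0
  have h2 := Nat.mod_le v (2 ^ (trailZ v + 1))
  omega

-- trailing zeros of a+1 are the trailing ones of a
theorem trailZ_succ_eq_trailN (a : Nat) : trailZ (a + 1) = trailN a := by
  induction a using Nat.strong_induction_on with
  | _ a ih =>
    by_cases hp : a % 2 = 1
    · have h1 : (a + 1) % 2 = 0 := by omega
      rw [trailZ_step (a + 1) h1 (by omega), trailN_step a hp]
      have hdiv : (a + 1) / 2 = a / 2 + 1 := by omega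
      rw [hdiv, ih (a / 2) (by omega)]
    · have h0 : a % 2 = 0 := by omega
      rw [trailZ_odd (a + 1) (by omega), trailN_even a h0]

theorem trailZerosI_natCast : ∀ (f v : Nat), 0 < v → v < 2 ^ f → trailZerosI (v : Int) f = trailZ v := by
  intro f
  induction f with
  | zero => intro v h1 h2; omega
  | succ f ih =>
    intro v h1 h2
    have hmod : PySem.Int.mod (v : Int) 2 = ((v % 2 : Nat) : Int) := by
      exact_mod_cast PySem.Int.mod_natCast v 2
    have hdiv : PySem.Int.floordiv (v : Int) 2 = ((v / 2 : Nat) : Int) := by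
      exact_mod_cast PySem.Int.floordiv_natCast v 2
    rw [trailZerosI, hmod, hdiv]
    by_cases hp : v % 2 = 0
    · have hcast : ((v % 2 : Nat) : Int) = 0 := by rw [hp]; norm_num
      rw [if_pos hcast, trailZ_step v hp (by omega),
          ih (v / 2) (by omega) (by rw [Nat.pow_succ] at h2; omega)]
    · have hcast : ¬ (((v % 2 : Nat) : Int) = 0) := by
        intro hcon
        exact hp (by exact_mod_cast hcon)
      rw [if_neg hcast, trailZ_odd v (by omega)]

-- A's value on a nonnegative element, in closed form
theorem element_eq (n : Int) (h0 : 0 ≤ n) (hB : n ≤ 2147483648) :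
    findLoop (pyBinTail n) (n + 1) (2 ^ 40) =
      (if n.toNat % 2 = 0 then n + 1 else n + 2 ^ (trailN n.toNat - 1)) := by
  set a := n.toNat with hadef
  have hna : n = (a : Int) := by omega
  have haB : a ≤ 2147483648 := by omega
  obtain ⟨hb1, hb2, hb3⟩ := pyBinTail_natCast a
  by_cases hp : a % 2 = 0
  · -- even: loop succeeds at the first candidate n+1
    rw [if_pos hp]
    rw [hna, hb1]
    have : ((a : Int) + 1) = ((a + 1 : Nat) : Int) := by push_cast; ring
    rw [this]
    exact loop_main a (2 ^ 40) (pbinLen a) (a + 1) (a + 1) hb3 hb2 (by omega) le_rfl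
      (by norm_num) (fun u h1 h2 => by omega) (by rw [hd_even a hp]; omega)
  · -- odd: loop succeeds first at n + 2^(k-1)
    have hp1 : a % 2 = 1 := by omega
    rw [if_neg hp]
    set k := trailN a with hk
    have hk1 : 1 ≤ k := trailN_ge_one a hp1
    have hrep := trailN_rep a hp1
    set q := a / 2 ^ (k + 1) with hq
    have hkle : 2 ^ k ≤ a + 1 := two_pow_trailN_le a hp1
    have hk32 : k ≤ 31 := by
      by_contra hcon
      have : (2:Nat) ^ 32 ≤ 2 ^ k := Nat.pow_le_pow_right (by omega) (by omega)
      have : (2:Nat) ^ 32 = 4294967296 := by norm_num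
      omega
    have hhalf : 2 ^ (k - 1) * 2 = 2 ^ k := by
      rw [← Nat.pow_succ]; congr 1; omega
    have h1k : (1:Nat) ≤ 2 ^ (k - 1) := Nat.one_le_two_pow
    -- the target value
    have hT : n + 2 ^ (k - 1) = ((a + 2 ^ (k - 1) : Nat) : Int) := by
      rw [hna]; push_cast; ring
    rw [hT, hna, hb1]
    have hcast1 : ((a : Int) + 1) = ((a + 1 : Nat) : Int) := by push_cast; ring
    rw [hcast1]
    refine loop_main a (2 ^ 40) (pbinLen a) (a + 1) (a + 2 ^ (k - 1)) hb3 hb2 (by omega)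
      (by omega) (by
        have : (2:Nat) ^ (k - 1) ≤ 2 ^ 31 := Nat.pow_le_pow_right (by omega) (by omega)
        have h31 : (2:Nat) ^ 31 = 2147483648 := by norm_num
        have h40 : (2:Nat) ^ 40 = 1099511627776 := by norm_num
        omega) ?_ ?_
    · -- all candidates below the target differ in more than 2 bits
      intro u hu1 hu2
      set d := u - a with hdd
      have hd1 : 1 ≤ d := by omega
      have hd2 : d ≤ 2 ^ (k - 1) := by omega
      have hval : hd a u = 1 + pc (2 ^ k - d) := by
        have heq : hd a u
            = hd (q * 2 ^ (k + 1) + (2 ^ k - 1)) (q * 2 ^ (k + 1) + (2 ^ k - 1) + d) := by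
          rw [← hrep]
          congr 1
          omega
        rw [heq, hd_odd k q d hk1 hd1 hd2]
      rw [hval]
      -- pc (2^k - d) ≥ 2 since 2^(k-1) < 2^k - d < 2^k
      have hlow : 2 ^ (k - 1) < 2 ^ k - d := by omega
      have hhigh : 2 ^ k - d < 2 ^ k := by omega
      have hpos := pc_pos (2 ^ k - d) (by omega)
      by_cases hone : pc (2 ^ k - d) = 1
      · exfalso
        have := pc_eq_one (2 ^ k - d) (k - 1) (by omega) (by
          rw [show k - 1 + 1 = k from by omega]; omega) hone
        omega
      · omega
    · -- the target differs in exactly 2 bits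
      have hTval : hd a (a + 2 ^ (k - 1)) = 1 + pc (2 ^ k - 2 ^ (k - 1)) := by
        have heq : hd a (a + 2 ^ (k - 1))
            = hd (q * 2 ^ (k + 1) + (2 ^ k - 1))
                 (q * 2 ^ (k + 1) + (2 ^ k - 1) + 2 ^ (k - 1)) := by
          rw [← hrep]
        rw [heq, hd_odd k q (2 ^ (k - 1)) hk1 (by omega) le_rfl]
      rw [hTval, show 2 ^ k - 2 ^ (k - 1) = 2 ^ (k - 1) from by omega, pc_pow]

-- ===== negative side =====

theorem xr_comm_aux : ∀ (s a b : Nat), a + b ≤ s → xr a b = xr b a := by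
  intro s
  induction s with
  | zero =>
    intro a b h
    have ha : a = 0 := by omega
    have hb : b = 0 := by omega
    subst ha; subst hb; rfl
  | succ s ih =>
    intro a b hs
    by_cases h : a = 0 ∧ b = 0
    · obtain ⟨h1, h2⟩ := h; subst h1; subst h2; rfl
    · have hlt : a / 2 + b / 2 ≤ s := by
        have ha := Nat.div_le_self a 2; have hb := Nat.div_le_self b 2
        rcases Decidable.not_and_iff_or_not.mp h with hne | hne
        · have := Nat.div_lt_self (Nat.pos_of_ne_zero hne) one_lt_two; omega
        · have := Nat.div_lt_self (Nat.pos_of_ne_zero hne) one_lt_two; omega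
      rw [xr_step a b h, xr_step b a (by tauto), ih (a / 2) (b / 2) hlt]
      by_cases hp : a % 2 = b % 2
      · rw [if_pos hp, if_pos hp.symm]
      · rw [if_neg hp, if_neg (fun hq => hp hq.symm)]

theorem xr_comm (a b : Nat) : xr a b = xr b a := xr_comm_aux (a + b) a b le_rfl

theorem xr_zero (a : Nat) : xr a 0 = a := by
  induction a using Nat.strong_induction_on with
  | _ a ih =>
    by_cases ha : a = 0
    · subst ha; rw [xr]; simp
    · rw [xr_step a 0 (by omega), ih (a / 2) (Nat.div_lt_self (Nat.pos_of_ne_zero ha) one_lt_two)]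
      have : (0:Nat) / 2 = 0 := rfl
      by_cases hp : a % 2 = 0 <;> simp [hp] <;> omega

theorem hd_neg (t q d : Nat) (hd1 : 1 ≤ d) (hd2 : d ≤ 2 ^ t) :
    hd (q * 2 ^ (t + 1) + 2 ^ t) (q * 2 ^ (t + 1) + 2 ^ t - d) = 1 + pc (2 ^ t - d) := by
  have h1t : (1:Nat) ≤ 2 ^ t := Nat.one_le_two_pow
  have hsub : q * 2 ^ (t + 1) + 2 ^ t - d = q * 2 ^ (t + 1) + (2 ^ t - d) :=
    Nat.add_sub_assoc hd2 _
  have htb := xr_topbit t (2 ^ t - d) 0 (by omega) (by positivity)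
  rw [Nat.add_zero] at htb
  rw [hd_eq_pc_xr, hsub,
      xr_high (t + 1) q (2 ^ t) (2 ^ t - d) (by rw [Nat.pow_succ]; omega) (by rw [Nat.pow_succ]; omega),
      xr_comm, htb, xr_zero, pc_topbit t (2 ^ t - d) (by omega)]

theorem natBin_len_pos (n : Nat) (h : n ≠ 0) : 0 < (natBin n).length := by
  rw [natBin]; simp [h]

theorem natBin_lower (n : Nat) (h : n ≠ 0) : 2 ^ ((natBin n).length - 1) ≤ n := by
  induction n using Nat.strong_induction_on with
  | _ n ih =>
    rw [natBin]
    simp only [h, dite_false, List.length_append, List.length_singleton]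
    by_cases h2 : n / 2 = 0
    · have : (natBin (n / 2)).length = 0 := by rw [h2, natBin]; simp
      rw [this]
      simpa using by omega
    · have ihb := ih (n / 2) (Nat.div_lt_self (by omega) one_lt_two) h2
      have hpos := natBin_len_pos (n / 2) h2
      have : 2 ^ ((natBin (n / 2)).length + 1 - 1) = 2 * 2 ^ ((natBin (n / 2)).length - 1) := by
        rw [show (natBin (n / 2)).length + 1 - 1 = ((natBin (n / 2)).length - 1) + 1 from by omega,
            Nat.pow_succ]
        ring
      rw [this]
      omega

theorem natBin_length_of (m L : Nat) (h0 : m ≠ 0) (h1 : 2 ^ (L - 1) ≤ m) (h2 : m < 2 ^ L)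
    (hL : 0 < L) : (natBin m).length = L := by
  obtain ⟨_, hup⟩ := natBin_eq_bitsF m h0
  have hlow := natBin_lower m h0
  have hpos := natBin_len_pos m h0
  set l := (natBin m).length with hl
  rcases Nat.lt_trichotomy l L with h | h | h
  · exfalso
    have : (2:Nat) ^ l ≤ 2 ^ (L - 1) := Nat.pow_le_pow_right (by omega) (by omega)
    omega
  · exact h
  · exfalso
    have : (2:Nat) ^ L ≤ 2 ^ (l - 1) := Nat.pow_le_pow_right (by omega) (by omega)
    omega

theorem solution_eq_map (numbers : List Int) :
    solution numbers
      = numbers.map (fun number => findLoop (pyBinTail number) (number + 1) (2 ^ 40)) := by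
  unfold solution
  rw [PySem.List.foldl_append_singleton_eq_map]
  simp

theorem zfill_self (cs : List Char) : PySem.Chars.zfill cs ((cs.length : Nat) : Int) = cs := by
  unfold PySem.Chars.zfill
  simp [PySem.List.len]

theorem loop_neg (v L : Nat) (hbF : natBin v = bitsF L v) (hvL : v < 2 ^ L) (hL : 0 < L) :
    ∀ (fuel m T : Nat), 2 ^ (L - 1) ≤ T → T ≤ m → m < v → m - T < fuel →
    (∀ u : Nat, T < u → u ≤ m → 2 < hd v u) → hd v T ≤ 2 →
    findLoop ('b' :: bitsF L v) (-(m : Int)) fuel = -(T : Int) := by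
  intro fuel
  induction fuel with
  | zero => intro m T _ _ _ h; omega
  | succ fuel ih =>
    intro m T hTlow hTm hmv hfuel hmid hT
    have h1L : (1:Nat) ≤ 2 ^ (L - 1) := Nat.one_le_two_pow
    have hm0 : m ≠ 0 := by omega
    have hmlen : (natBin m).length = L := natBin_length_of m L hm0 (by omega) (by omega) hL
    have hmbF : natBin m = bitsF L m := by
      have := (natBin_eq_bitsF m hm0).1
      rw [hmlen] at this
      exact this
    rw [findLoop]
    have hneg : (-(m : Int)) < 0 := by omega
    have habs : (-(m : Int)).natAbs = m := by omega
    have hbin2 : pyBinTail (-(m : Int)) = 'b' :: bitsF L m := by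
      unfold pyBinTail
      rw [if_pos hneg, habs, hmbF]
    simp only [hbin2]
    have hmax : max (PySem.List.len ('b' :: bitsF L v)) (PySem.List.len ('b' :: bitsF L m))
        = (((('b' :: bitsF L v).length : Nat)) : Int) := by
      simp [PySem.List.len, length_bitsF]
    rw [hmax]
    have hlen2 : ('b' :: bitsF L v).length = ('b' :: bitsF L m).length := by
      simp [length_bitsF]
    rw [zfill_self ('b' :: bitsF L v), hlen2, zfill_self ('b' :: bitsF L m)]
    have hcd : countDiff ('b' :: bitsF L v) ('b' :: bitsF L m) 0
        = countDiff (bitsF L v) (bitsF L m) 0 := by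
      simp [countDiff]
    have hcond : (countDiff ('b' :: bitsF L v) ('b' :: bitsF L m) 0 ≤ 2) ↔ hd v m ≤ 2 := by
      rw [hcd, countDiff_le_iff, dC_bitsF L v m hvL (by omega)]
      omega
    by_cases hc : countDiff ('b' :: bitsF L v) ('b' :: bitsF L m) 0 ≤ 2
    · have hdm : hd v m ≤ 2 := hcond.mp hc
      have : ¬ (T < m) := fun hlt => absurd hdm (by have := hmid m hlt le_rfl; omega)
      have hTm' : m = T := by omega
      subst hTm'
      rw [if_pos hc]
    · have hdm : ¬ (hd v m ≤ 2) := fun h => hc (hcond.mpr h)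
      have hne : T ≠ m := fun h => hdm (h ▸ hT)
      have hlt : T < m := by omega
      rw [if_neg hc]
      have hcast : (-(m : Int) + 1) = -(((m - 1 : Nat)) : Int) := by
        have : ((m - 1 : Nat) : Int) = (m : Int) - 1 := by omega
        omega
      rw [hcast]
      exact ih (m - 1) T hTlow (by omega) (by omega) (by omega)
        (fun u h1 h2 => hmid u h1 (by omega)) hT

-- A's value on a negative element, in terms of the trailing-zero count of |n|
theorem element_eq_neg (n : Int) (hneg : n < 0) (hB : -n ≤ 2147483648)
    (hP : ∀ k : Nat, 1 ≤ k → k ≤ 64 → -n ≠ 2 ^ k) :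
    findLoop (pyBinTail n) (n + 1) (2 ^ 40)
      = (if 2 ≤ trailZ n.natAbs then n + 2 ^ (trailZ n.natAbs - 1) else n + 1) := by
  by_cases hone : n = -1
  · -- n = -1 : the loop stops at the first candidate 0 ('b1' vs '00' differ in 2 places)
    subst hone
    have h40 : (2:Nat) ^ 40 = 1099511627775 + 1 := by norm_num
    have hnb0 : natBin 0 = [] := by rw [natBin]; simp
    have hnb1 : natBin 1 = ['1'] := by rw [natBin]; simp [hnb0]
    have hpb : pyBinTail (-1) = ['b', '1'] := by
      rw [pyBinTail]
      norm_num [hnb1]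
    have hpb0 : pyBinTail 0 = ['0'] := by rw [pyBinTail]; norm_num
    rw [show ((-1 : Int)).natAbs = 1 from rfl, trailZ_odd 1 rfl,
        if_neg (by norm_num : ¬ (2:Nat) ≤ 0)]
    rw [h40, show (-1 : Int) + 1 = 0 from by norm_num, findLoop, hpb, hpb0]
    decide
  set v := n.natAbs with hvdef
  have hv1 : 2 ≤ v := by omega
  have hnv : n = -(v : Int) := by omega
  have hvB : v ≤ 2147483648 := by omega
  -- digit-string facts for v
  obtain ⟨hbF, hvL⟩ := natBin_eq_bitsF v (by omega)
  have hlow := natBin_lower v (by omega)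
  have hLpos := natBin_len_pos v (by omega)
  set L := (natBin v).length with hLdef
  have hbin1 : pyBinTail n = 'b' :: bitsF L v := by
    unfold pyBinTail
    rw [if_pos (by omega : n < 0), show n.natAbs = v from rfl, hbF]
  -- representation by trailing zeros
  set t := trailZ v with htdef
  have hrep := trailZ_rep v (by omega)
  rw [← htdef] at hrep
  set q := v / 2 ^ (t + 1) with hqdef
  have h2t : 2 ^ t ≤ v := by
    have := two_pow_trailZ_le v (by omega)
    rw [← htdef] at this
    exact this
  have ht31 : t ≤ 31 := by
    by_contra hcon
    have : (2:Nat) ^ 32 ≤ 2 ^ t := Nat.pow_le_pow_right (by omega) (by omega)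
    have h32 : (2:Nat) ^ 32 = 4294967296 := by norm_num
    omega
  have hq1 : 1 ≤ q := by
    rcases Nat.eq_zero_or_pos q with hq0 | h
    · exfalso
      rw [hq0] at hrep
      have hv : v = 2 ^ t := by simpa using hrep
      have ht1 : 1 ≤ t := by
        rcases Nat.eq_zero_or_pos t with h0 | h1
        · rw [h0] at hv; simp at hv; omega
        · exact h1
      apply hP t ht1 (by omega)
      rw [show -n = (v : Int) from by omega, hv]
      push_cast
      ring
    · exact h
  have hL32 : L ≤ 32 := by
    by_contra hcon
    have : (2:Nat) ^ 32 ≤ 2 ^ (L - 1) := Nat.pow_le_pow_right (by omega) (by omega)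
    have h32 : (2:Nat) ^ 32 = 4294967296 := by norm_num
    omega
  have htL : t + 2 ≤ L := by
    have hv2 : 2 ^ (t + 1) ≤ v := by
      calc 2 ^ (t + 1) = 1 * 2 ^ (t + 1) := (one_mul _).symm
        _ ≤ q * 2 ^ (t + 1) := Nat.mul_le_mul_right _ hq1
        _ ≤ q * 2 ^ (t + 1) + 2 ^ t := Nat.le_add_right _ _
        _ = v := hrep.symm
    by_contra hcon
    have : (2:Nat) ^ L ≤ 2 ^ (t + 1) := Nat.pow_le_pow_right (by omega) (by omega)
    omega
  have h1t : (1:Nat) ≤ 2 ^ t := Nat.one_le_two_pow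
  have h1t1 : (1:Nat) ≤ 2 ^ (t - 1) := Nat.one_le_two_pow
  have hhalf : t ≥ 1 → 2 ^ (t - 1) * 2 = 2 ^ t := by
    intro h
    rw [← Nat.pow_succ]; congr 1; omega
  -- v is at least 2^(L-1) + 2^(t-1) (uses v % 2^(t+1) = 2^t and t + 2 ≤ L)
  have hL2 : 2 ≤ L := by
    by_contra hcon
    have hL1 : L = 1 := by omega
    rw [hL1] at hvL
    omega
  have hvneL : v ≠ 2 ^ (L - 1) := by
    intro hcon
    apply hP (L - 1) (by omega) (by omega)
    rw [show -n = (v : Int) from by omega, hcon]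
    push_cast
    ring
  have hvlow : 2 ^ (L - 1) + 2 ^ (t - 1) ≤ v := by
    by_cases ht0 : t = 0
    · have h1 : (2:Nat) ^ (t - 1) = 1 := by rw [show t - 1 = 0 from by omega, pow_zero]
      omega
    · by_contra hcon
      have hr : v - 2 ^ (L - 1) < 2 ^ (t - 1) := by omega
      have hmodv := trailZ_mod v (by omega)
      rw [← htdef] at hmodv
      have : v % 2 ^ (t + 1) = (v - 2 ^ (L - 1)) % 2 ^ (t + 1) := by
        conv_lhs => rw [show v = 2 ^ (t + 1) * 2 ^ (L - 2 - t) + (v - 2 ^ (L - 1)) from by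
          rw [← pow_add, show t + 1 + (L - 2 - t) = L - 1 from by omega]
          omega]
        rw [Nat.mul_add_mod]
      have hlt : v - 2 ^ (L - 1) < 2 ^ (t + 1) := by
        have : (2:Nat) ^ (t - 1) ≤ 2 ^ (t + 1) := Nat.pow_le_pow_right (by omega) (by omega)
        omega
      rw [Nat.mod_eq_of_lt hlt] at this
      have : (2:Nat) ^ (t - 1) < 2 ^ t := Nat.pow_lt_pow_right (by omega) (by omega)
      omega
  rw [hbin1, hnv]
  have hstart : (-(v : Int) + 1) = -(((v - 1 : Nat)) : Int) := by omega
  rw [hstart]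
  by_cases h2le : 2 ≤ t
  · -- answer -(v - 2^(t-1))
    rw [if_pos h2le]
    have hTval : -(v : Int) + 2 ^ (t - 1) = -(((v - 2 ^ (t - 1) : Nat)) : Int) := by
      have hc : ((v - 2 ^ (t - 1) : Nat) : Int) = (v : Int) - ((2 ^ (t - 1) : Nat) : Int) := by
        have : (2:Nat) ^ (t - 1) ≤ v := by omega
        omega
      rw [hc]
      push_cast
      ring
    rw [hTval]
    refine loop_neg v L hbF hvL (by omega) (2 ^ 40) (v - 1) (v - 2 ^ (t - 1)) (by omega)
      (by omega) (by omega) (by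
        have : (2:Nat) ^ (t - 1) ≤ 2 ^ 31 := Nat.pow_le_pow_right (by omega) (by omega)
        have h31 : (2:Nat) ^ 31 = 2147483648 := by norm_num
        have h40 : (2:Nat) ^ 40 = 1099511627776 := by norm_num
        omega) ?_ ?_
    · intro u hu1 hu2
      set d := v - u with hddef
      have hd1 : 1 ≤ d := by omega
      have hd2 : d < 2 ^ (t - 1) := by omega
      have hval : hd v u = 1 + pc (2 ^ t - d) := by
        have heq : hd v u = hd (q * 2 ^ (t + 1) + 2 ^ t) (q * 2 ^ (t + 1) + 2 ^ t - d) := by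
          rw [← hrep]
          congr 1
          omega
        rw [heq, hd_neg t q d hd1 (by omega)]
      rw [hval]
      have hlow2 : 2 ^ (t - 1) < 2 ^ t - d := by omega
      have hpos := pc_pos (2 ^ t - d) (by omega)
      by_cases hone2 : pc (2 ^ t - d) = 1
      · exfalso
        have := pc_eq_one (2 ^ t - d) (t - 1) (by omega) (by
          rw [show t - 1 + 1 = t from by omega]; omega) hone2
        omega
      · omega
    · have hval : hd v (v - 2 ^ (t - 1)) = 1 + pc (2 ^ t - 2 ^ (t - 1)) := by
        have heq : hd v (v - 2 ^ (t - 1))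
            = hd (q * 2 ^ (t + 1) + 2 ^ t) (q * 2 ^ (t + 1) + 2 ^ t - 2 ^ (t - 1)) := by
          rw [← hrep]
        rw [heq, hd_neg t q (2 ^ (t - 1)) (by omega) (by omega)]
      rw [hval, show 2 ^ t - 2 ^ (t - 1) = 2 ^ (t - 1) from by
        have := hhalf (by omega); omega, pc_pow]
  · -- t ≤ 1 : answer n + 1, found at the first candidate
    rw [if_neg h2le]
    have hT1 : hd v (v - 1) ≤ 2 := by
      have hval : hd v (v - 1) = 1 + pc (2 ^ t - 1) := by
        have heq : hd v (v - 1)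
            = hd (q * 2 ^ (t + 1) + 2 ^ t) (q * 2 ^ (t + 1) + 2 ^ t - 1) := by rw [← hrep]
        rw [heq, hd_neg t q 1 (by omega) (by omega)]
      have hpcsmall : pc (2 ^ t - 1) ≤ 1 := by
        interval_cases t
        · simp [pc]
        · rw [show (2:Nat) ^ 1 - 1 = 1 from by norm_num, pc_step 1 (by omega)]
          rw [show (1:Nat) / 2 = 0 from rfl, pc]
          simp
      omega
    exact loop_neg v L hbF hvL (by omega) (2 ^ 40) (v - 1) (v - 1) (by omega) le_rfl
      (by omega) (by norm_num) (fun u h1 h2 => by omega) hT1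

theorem solution_alt_eq_map (numbers : List Int) :
    solution_alt numbers
      = numbers.map (fun number =>
          let m := if 0 ≤ number then number + 1 else -number
          let t := trailZerosI m 64
          number + (if t ≠ 0 then 2 ^ (t - 1) else 1)) := by
  unfold solution_alt
  rw [PySem.List.foldl_append_singleton_eq_map]
  simp

-- ===== VERDICT (by name: the statement is the Claim_ definition above) =====
theorem solution_spec : Claim_equal_solution := by
  intro numbers hdom hpre
  unfold Spec_solution
  rw [solution_eq_map, solution_alt_eq_map]
  apply List.map_congr_left
  intro n hn
  have hdomn : -2147483648 ≤ n ∧ n ≤ 2147483648 := by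
    have := List.all_eq_true.mp hdom n hn
    exact of_decide_eq_true this
  by_cases hneg : 0 ≤ n
  · -- nonnegative: m = n + 1, t = trailZ (a + 1) = trailN a
    simp only [if_pos hneg]
    set a := n.toNat with hadef
    have hna : n = (a : Int) := by omega
    have hcast : n + 1 = ((a + 1 : Nat) : Int) := by omega
    have ht : trailZerosI (n + 1) 64 = trailN a := by
      rw [hcast, trailZerosI_natCast 64 (a + 1) (by omega) (by
        have h32 : (2:Nat) ^ 32 ≤ 2 ^ 64 := Nat.pow_le_pow_right (by omega) (by omega)
        have : (2:Nat) ^ 32 = 4294967296 := by norm_num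
        omega), trailZ_succ_eq_trailN]
    rw [element_eq n hneg (by omega), ht]
    by_cases hp : a % 2 = 0
    · rw [if_pos hp, trailN_even a hp]
      simp
    · have hp1 : a % 2 = 1 := by omega
      have hge := trailN_ge_one a hp1
      rw [if_neg hp, if_pos (by omega : trailN a ≠ 0)]
  · -- negative: m = -n, t = trailZ |n|
    simp only [if_neg hneg]
    have hvpos : 0 < n.natAbs := by omega
    have ht : trailZerosI (-n) 64 = trailZ n.natAbs := by
      rw [show -n = ((n.natAbs : Nat) : Int) from by omega,
          trailZerosI_natCast 64 n.natAbs hvpos (by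
        have : (2:Nat) ^ 32 = 4294967296 := by norm_num
        omega)]
    rw [element_eq_neg n (by omega) (by omega) (hpre n hn (by omega)), ht]
    set t := trailZ n.natAbs with htdef
    by_cases h2 : 2 ≤ t
    · rw [if_pos h2, if_pos (by omega : t ≠ 0)]
    · rw [if_neg h2]
      by_cases h0 : t = 0
      · rw [if_neg (by omega : ¬ t ≠ 0)]
      · have ht1 : t = 1 := by omega
        rw [if_pos (by omega : t ≠ 0), ht1]
        norm_num
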